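-- pv_equiv track=rewrite | github.com/clearledgr/Clearledgr-AP | clearledgr/core/ap_entity_routing.py | _matches_domain
-- ===== SOURCE A (Python) =====
-- from typing import Any, Dict, List, Optional
--
-- def _token(value: Any) -> str:
--     return str(value or "").strip()
--
-- def _token_lower(value: Any) -> str:
--     return _token(value).lower()
--
-- def _matches_domain(domain: str, patterns: List[str]) -> bool:
--     normalized_domain = _token_lower(domain)
--     if not normalized_domain:
--         return False
--     for pattern in patterns:
--         lowered = _token_lower(pattern)
--         if not lowered:
--             continue
--         if normalized_domain == lowered or normalized_domain.endswith(f".{lowered}"):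
--             return True
--     return False
-- ===== SOURCE B (Python) =====
-- def _matches_domain(domain, patterns):
--     nd = str(domain or "").strip().lower()
--     if not nd:
--         return False
--     pats = set()
--     for p in patterns:
--         q = str(p or "").strip().lower()
--         if q:
--             pats.add(q)
--     if nd in pats:
--         return True
--     return any(nd[i + 1:] in pats for i, ch in enumerate(nd) if ch == '.')
-- ===== Notes on version B (the rewrite author's own statement) =====
-- stated objective: idiomatic
-- what changed: B builds the set of normalized patterns once and checks the domain's own dot-boundary suffixes against it with O(1) set lookups, instead of A's scan over the patterns doing an endswith per pattern.
import Mathlib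
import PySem

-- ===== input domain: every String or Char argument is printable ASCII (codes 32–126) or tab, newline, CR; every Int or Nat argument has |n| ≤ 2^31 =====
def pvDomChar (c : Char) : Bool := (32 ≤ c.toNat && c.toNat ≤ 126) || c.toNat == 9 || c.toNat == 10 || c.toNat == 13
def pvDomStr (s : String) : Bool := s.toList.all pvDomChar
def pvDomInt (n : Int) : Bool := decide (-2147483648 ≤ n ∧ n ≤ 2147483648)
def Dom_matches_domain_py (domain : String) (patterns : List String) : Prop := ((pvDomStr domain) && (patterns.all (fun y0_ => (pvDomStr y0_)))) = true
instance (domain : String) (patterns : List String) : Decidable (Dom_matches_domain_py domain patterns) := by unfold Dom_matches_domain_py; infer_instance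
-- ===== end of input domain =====

-- B replaces A's per-pattern endswith scan by a set of normalized patterns probed with the domain's dot-boundary suffixes (idiomatic; same results).


-- ===== PORT A =====
-- _token(value): str(value or "").strip(); on a str argument `value or ""` is `value` when nonempty, "" when empty
def pvToken (value : String) : String := PySem.Str.strip (if value = "" then "" else value)

def pvTokenLower (value : String) : String := PySem.Str.lower (pvToken value)

-- the `for pattern in patterns` loop of A; f".{lowered}" is '.' consed onto lowered's characters
def pvLoopA (nd : String) : List String → Bool
  | [] => false
  | p :: rest =>
    let lowered := pvTokenLower p
    if lowered = "" then pvLoopA nd rest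
    else if nd = lowered ∨ PySem.Str.endswith nd (String.ofList ('.' :: lowered.toList)) = true then true
    else pvLoopA nd rest

def matches_domain_py (domain : String) (patterns : List String) : Bool :=
  let nd := pvTokenLower domain
  if nd = "" then false else pvLoopA nd patterns

-- ===== PORT B =====
-- B normalizes a pattern inline: str(p or "").strip().lower()
def pvNormB (p : String) : String := PySem.Str.lower (PySem.Str.strip (if p = "" then "" else p))

-- the `for p in patterns: … pats.add(q)` loop of B
def pvPatSet (patterns : List String) : PySem.Set String :=
  patterns.foldl (fun s p => if pvNormB p = "" then s else PySem.Set.add s (pvNormB p)) PySem.Set.empty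

-- nd[i + 1:] is the slice of nd from i+1; enumerate(nd) enumerates nd's characters
def matches_domain_py_alt (domain : String) (patterns : List String) : Bool :=
  let nd := pvNormB domain
  if nd = "" then false
  else
    let pats := pvPatSet patterns
    if PySem.Set.contains pats nd then true
    else
      (PySem.List.enumerate nd.toList).any (fun ic =>
        ic.2 == '.' && PySem.Set.contains pats (String.ofList (PySem.List.slice nd.toList (some (ic.1 + 1)) none)))

-- ===== PRECONDITION & SPEC =====
def Spec_matches_domain_py (domain : String) (patterns : List String) (out : Bool) : Prop := out = matches_domain_py_alt domain patterns
instance (domain : String) (patterns : List String) (out : Bool) : Decidable (Spec_matches_domain_py domain patterns out) := by unfold Spec_matches_domain_py; infer_instance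

-- ===== CLAIM (what is proved, stated in full; the proofs are below) =====
def Claim_equal_matches_domain_py : Prop := ∀ (domain : String) (patterns : List String), Dom_matches_domain_py domain patterns → Spec_matches_domain_py domain patterns (matches_domain_py domain patterns)

-- ===== LEMMAS AND PROOFS =====

-- A's loop returns true iff some pattern normalizes to a nonempty string that matches
theorem pvLoopA_iff (nd : String) (ps : List String) :
    pvLoopA nd ps = true ↔ ∃ p ∈ ps, pvTokenLower p ≠ "" ∧
      (nd = pvTokenLower p ∨ PySem.Str.endswith nd (String.ofList ('.' :: (pvTokenLower p).toList)) = true) := by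
  induction ps with
  | nil => simp [pvLoopA]
  | cons p rest ih =>
    simp only [pvLoopA]
    by_cases h0 : pvTokenLower p = ""
    · rw [if_pos h0, ih]
      simp only [List.mem_cons]
      constructor
      · rintro ⟨q, hq, h1, h2⟩; exact ⟨q, Or.inr hq, h1, h2⟩
      · rintro ⟨q, (rfl | hq), h1, h2⟩
        · exact absurd h0 h1
        · exact ⟨q, hq, h1, h2⟩
    · rw [if_neg h0]
      by_cases hm : nd = pvTokenLower p ∨ PySem.Str.endswith nd (String.ofList ('.' :: (pvTokenLower p).toList)) = true
      · rw [if_pos hm]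
        simp only [true_iff]
        exact ⟨p, List.mem_cons_self .., h0, hm⟩
      · rw [if_neg hm, ih]
        simp only [List.mem_cons]
        constructor
        · rintro ⟨q, hq, h1, h2⟩; exact ⟨q, Or.inr hq, h1, h2⟩
        · rintro ⟨q, (rfl | hq), h1, h2⟩
          · exact absurd h2 hm
          · exact ⟨q, hq, h1, h2⟩

-- membership in B's pattern set
theorem mem_pvPatSet (ps : List String) (x : String) :
    x ∈ pvPatSet ps ↔ ∃ p ∈ ps, pvNormB p = x ∧ x ≠ "" := by
  have gen : ∀ (l : List String) (s : PySem.Set String),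
      x ∈ l.foldl (fun s p => if pvNormB p = "" then s else PySem.Set.add s (pvNormB p)) s ↔
        x ∈ s ∨ ∃ p ∈ l, pvNormB p = x ∧ x ≠ "" := by
    intro l
    induction l with
    | nil => simp
    | cons p rest ih =>
      intro s
      rw [List.foldl_cons]
      by_cases h0 : pvNormB p = ""
      · rw [if_pos h0, ih]
        simp only [List.mem_cons]
        constructor
        · rintro (h | ⟨q, hq, h1, h2⟩)
          · exact Or.inl h
          · exact Or.inr ⟨q, Or.inr hq, h1, h2⟩
        · rintro (h | ⟨q, (rfl | hq), h1, h2⟩)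
          · exact Or.inl h
          · exact absurd (h1 ▸ h0).symm (Ne.symm h2)
          · exact Or.inr ⟨q, hq, h1, h2⟩
      · rw [if_neg h0, ih]
        rw [show ∀ y, (y ∈ PySem.Set.add s (pvNormB p)) ↔ (y ∈ s ∨ y = pvNormB p) from
          fun y => PySem.Set.mem_add s (pvNormB p) y]
        simp only [List.mem_cons]
        constructor
        · rintro ((h | h) | ⟨q, hq, h1, h2⟩)
          · exact Or.inl h
          · exact Or.inr ⟨p, Or.inl rfl, h.symm, h ▸ h0⟩
          · exact Or.inr ⟨q, Or.inr hq, h1, h2⟩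
        · rintro (h | ⟨q, (rfl | hq), h1, h2⟩)
          · exact Or.inl (Or.inl h)
          · exact Or.inl (Or.inr h1.symm)
          · exact Or.inr ⟨q, hq, h1, h2⟩
  simpa [pvPatSet] using gen ps PySem.Set.empty

-- '.'-prefixed suffix characterization: ('.' :: l) is a suffix of cs iff some position k holds '.' and the tail after it is l
theorem dot_suffix_iff (cs l : List Char) :
    ('.' :: l) <:+ cs ↔ ∃ k, ∃ _ : k < cs.length, cs[k] = '.' ∧ cs.drop (k + 1) = l := by
  constructor
  · rintro ⟨t, ht⟩
    have hlen : t.length < cs.length := by rw [← ht]; simp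
    refine ⟨t.length, hlen, ?_, ?_⟩
    · have : cs[t.length]? = some '.' := by
        rw [← ht, List.getElem?_append_right (le_refl _)]; simp
      simpa [List.getElem?_eq_getElem hlen] using this
    · rw [← ht, show t.length + 1 = (t ++ ['.']).length by simp,
        show t ++ '.' :: l = (t ++ ['.']) ++ l by simp]
      exact List.drop_left
  · rintro ⟨k, hk, hc, hd⟩
    have : cs.drop k = '.' :: l := by rw [List.drop_eq_getElem_cons hk, hc, hd]
    exact this ▸ List.drop_suffix k cs

-- B's inline normalization is A's _token_lower
theorem pvNormB_eq (p : String) : pvNormB p = pvTokenLower p := rfl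

-- the suffix-probing `any` of B equals A's loop when nd itself is not in the pattern set
theorem pointwise_eq (domain : String) (patterns : List String) :
    matches_domain_py domain patterns = matches_domain_py_alt domain patterns := by
  unfold matches_domain_py matches_domain_py_alt
  simp only [pvNormB_eq]
  set nd := pvTokenLower domain with hnd
  by_cases h0 : nd = ""
  · simp [h0]
  · rw [if_neg h0, if_neg h0]
    by_cases hin : PySem.Set.contains (pvPatSet patterns) nd = true
    · -- nd itself is a normalized pattern: A's loop finds it too
      rw [if_pos hin, pvLoopA_iff]
      rcases (mem_pvPatSet patterns nd).mp ((PySem.Set.contains_iff _ _).mp hin) with ⟨p, hp, h1, _⟩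
      rw [pvNormB_eq] at h1
      exact ⟨p, hp, h1 ▸ h0, Or.inl h1.symm⟩
    · rw [if_neg hin, Bool.eq_iff_iff, pvLoopA_iff, List.any_eq_true]
      constructor
      · rintro ⟨p, hp, h1, h2 | h2⟩
        · -- nd = pvTokenLower p would put nd in the set, contradicting hin
          exact absurd ((PySem.Set.contains_iff _ _).mpr ((mem_pvPatSet patterns nd).mpr
            ⟨p, hp, by rw [pvNormB_eq]; exact h2.symm, h0⟩)) hin
        · rw [PySem.Str.endswith_eq, PySem.Chars.endswith_iff] at h2
          rw [String.toList_ofList] at h2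
          rcases (dot_suffix_iff nd.toList (pvTokenLower p).toList).mp h2 with ⟨k, hk, hc, hd⟩
          refine ⟨((k : Int), nd.toList[k]), ?_, ?_⟩
          · rw [PySem.List.mem_enumerate_iff]; exact ⟨k, hk, by simp⟩
          · simp only [hc, beq_self_eq_true, Bool.true_and]
            rw [show ((k : Int) + 1) = ((k + 1 : Nat) : Int) by push_cast; ring,
              PySem.List.slice_from_natCast, hd]
            refine (PySem.Set.contains_iff _ _).mpr ((mem_pvPatSet patterns _).mpr ⟨p, hp, ?_, ?_⟩)
            · rw [pvNormB_eq]; exact (String.toList_inj.mp (by rw [String.toList_ofList])).symm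
            · intro hcon
              apply h1
              apply String.toList_inj.mp
              have := congrArg String.toList hcon
              rw [String.toList_ofList] at this
              simpa using this
      · rintro ⟨ic, hmem, hf⟩
        rw [PySem.List.mem_enumerate_iff] at hmem
        rcases hmem with ⟨k, hk, rfl⟩
        simp only [Bool.and_eq_true, beq_iff_eq] at hf
        rcases hf with ⟨hc, hs⟩
        rw [show ((0 : Int) + (k : Int) + 1) = ((k + 1 : Nat) : Int) by push_cast; ring,
          PySem.List.slice_from_natCast] at hs
        rcases (mem_pvPatSet patterns _).mp ((PySem.Set.contains_iff _ _).mp hs) with ⟨p, hp, h1, h2⟩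
        rw [pvNormB_eq] at h1
        refine ⟨p, hp, by rw [h1]; exact h2, Or.inr ?_⟩
        rw [PySem.Str.endswith_eq, PySem.Chars.endswith_iff, String.toList_ofList]
        refine (dot_suffix_iff nd.toList (pvTokenLower p).toList).mpr ⟨k, hk, by simpa using hc, ?_⟩
        rw [h1, String.toList_ofList]

-- ===== VERDICT (by name: the statement is the Claim_ definition above) =====
theorem matches_domain_py_spec : Claim_equal_matches_domain_py := by
  intro domain patterns _
  unfold Spec_matches_domain_py
  exact pointwise_eq domain patterns
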